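-- pv_equiv track=rewrite | github.com/febos/SQUARNA | bench_msn.py | StemmedIsolated
-- ===== SOURCE A (Python) =====
-- def StemmedIsolated(sorted_pairs):
--
--     sp = sorted_pairs
--
--     stemmed, isolated = [], []
--
--     if len(sp) < 2:
--         if not sp:
--             return [], []
--         else:
--             return [],[sp[0][0],sp[0][1]]
--
--     for i in range(len(sp)):
--
--         if i==0:
--             if sp[i][0] + 1 == sp[i+1][0] and sp[i][1] == sp[i+1][1] + 1:
--                 stemmed.append(sp[i])
--             else:
--                 isolated.append(sp[i][0])
--                 isolated.append(sp[i][1])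
--
--         elif i==len(sp)-1:
--             if sp[i-1][0] + 1 == sp[i][0] and sp[i-1][1] == sp[i][1] + 1:
--                 stemmed.append(sp[i])
--             else:
--                 isolated.append(sp[i][0])
--                 isolated.append(sp[i][1])
--
--         else:
--             if sp[i][0] + 1 == sp[i+1][0] and sp[i][1] == sp[i+1][1] + 1 or \
--                sp[i-1][0] + 1 == sp[i][0] and sp[i-1][1] == sp[i][1] + 1:
--                 stemmed.append(sp[i])
--             else:
--                 isolated.append(sp[i][0])
--                 isolated.append(sp[i][1])
--
--     return stemmed, isolated
-- ===== SOURCE B (Python) =====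
-- def StemmedIsolated(sorted_pairs):
--     # Stage 1: segment the sorted pairs into maximal stem runs
--     # (maximal blocks of consecutive pairs (i,j),(i+1,j-1),...).
--     runs = []
--     cur = []
--     for p in sorted_pairs:
--         if cur and cur[-1][0] + 1 == p[0] and cur[-1][1] == p[1] + 1:
--             cur.append(p)
--         else:
--             if cur:
--                 runs.append(cur)
--             cur = [p]
--     if cur:
--         runs.append(cur)
--     # Stage 2: runs of length >= 2 are stems; singleton runs are isolated pairs.
--     stemmed = [p for r in runs if len(r) >= 2 for p in r]
--     isolated = [x for r in runs if len(r) == 1 for x in (r[0][0], r[0][1])]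
--     return stemmed, isolated
-- ===== Notes on version B (the rewrite author's own statement) =====
-- stated objective: alternative
-- what changed: B segments the sorted pairs into maximal stem runs in a first pass and then classifies whole runs by length (>=2 stemmed, singleton isolated), instead of A's per-index neighbor tests with first/last/middle and len<2 special cases.
import Mathlib
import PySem

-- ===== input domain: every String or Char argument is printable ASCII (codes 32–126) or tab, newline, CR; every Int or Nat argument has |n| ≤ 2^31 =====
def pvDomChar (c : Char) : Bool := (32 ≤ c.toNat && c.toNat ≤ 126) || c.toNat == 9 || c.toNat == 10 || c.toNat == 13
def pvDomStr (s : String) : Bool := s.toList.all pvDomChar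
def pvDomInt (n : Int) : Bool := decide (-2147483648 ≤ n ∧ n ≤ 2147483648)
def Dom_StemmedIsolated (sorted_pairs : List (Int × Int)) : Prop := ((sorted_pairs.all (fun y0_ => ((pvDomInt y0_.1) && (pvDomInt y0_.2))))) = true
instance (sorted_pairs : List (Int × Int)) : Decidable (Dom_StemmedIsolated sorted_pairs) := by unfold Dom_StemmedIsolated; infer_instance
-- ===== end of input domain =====

-- B first segments the pairs into maximal stem runs and then classifies whole runs by
-- length, instead of A's per-index neighbour tests with boundary cases (objective: alternative).

-- ===== PORT A =====
def StemmedIsolated (sorted_pairs : List (Int × Int)) : (List (Int × Int)) × List Int :=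
  let sp := sorted_pairs
  if sp.length < 2 then
    if sp = [] then ([], [])
    else ([], [(PySem.List.pyGetD sp 0 (0, 0)).1, (PySem.List.pyGetD sp 0 (0, 0)).2])
  else
    (PySem.List.pyRange 0 sp.length 1).foldl (fun st i =>
      if i == 0 then
        if (PySem.List.pyGetD sp i (0, 0)).1 + 1 == (PySem.List.pyGetD sp (i + 1) (0, 0)).1 &&
           (PySem.List.pyGetD sp i (0, 0)).2 == (PySem.List.pyGetD sp (i + 1) (0, 0)).2 + 1 then
          (st.1 ++ [PySem.List.pyGetD sp i (0, 0)], st.2)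
        else
          (st.1, st.2 ++ [(PySem.List.pyGetD sp i (0, 0)).1, (PySem.List.pyGetD sp i (0, 0)).2])
      else if i == (sp.length : Int) - 1 then
        if (PySem.List.pyGetD sp (i - 1) (0, 0)).1 + 1 == (PySem.List.pyGetD sp i (0, 0)).1 &&
           (PySem.List.pyGetD sp (i - 1) (0, 0)).2 == (PySem.List.pyGetD sp i (0, 0)).2 + 1 then
          (st.1 ++ [PySem.List.pyGetD sp i (0, 0)], st.2)
        else
          (st.1, st.2 ++ [(PySem.List.pyGetD sp i (0, 0)).1, (PySem.List.pyGetD sp i (0, 0)).2])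
      else
        if ((PySem.List.pyGetD sp i (0, 0)).1 + 1 == (PySem.List.pyGetD sp (i + 1) (0, 0)).1 &&
            (PySem.List.pyGetD sp i (0, 0)).2 == (PySem.List.pyGetD sp (i + 1) (0, 0)).2 + 1) ||
           ((PySem.List.pyGetD sp (i - 1) (0, 0)).1 + 1 == (PySem.List.pyGetD sp i (0, 0)).1 &&
            (PySem.List.pyGetD sp (i - 1) (0, 0)).2 == (PySem.List.pyGetD sp i (0, 0)).2 + 1) then
          (st.1 ++ [PySem.List.pyGetD sp i (0, 0)], st.2)
        else
          (st.1, st.2 ++ [(PySem.List.pyGetD sp i (0, 0)).1, (PySem.List.pyGetD sp i (0, 0)).2]))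
      ([], [])

-- ===== PORT B =====
-- B-side helper: the body of Source B's segmentation loop (state = (runs, cur))
def pvStepB (st : List (List (Int × Int)) × List (Int × Int)) (p : Int × Int) :
    List (List (Int × Int)) × List (Int × Int) :=
  if decide (st.2 ≠ []) &&
     ((st.2.getLastD (0, 0)).1 + 1 == p.1 && (st.2.getLastD (0, 0)).2 == p.2 + 1) then
    (st.1, st.2 ++ [p])
  else
    ((if st.2 = [] then st.1 else st.1 ++ [st.2]), [p])

def StemmedIsolated_alt (sorted_pairs : List (Int × Int)) : (List (Int × Int)) × List Int :=
  let st := sorted_pairs.foldl pvStepB ([], [])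
  let runs := if st.2 = [] then st.1 else st.1 ++ [st.2]
  ((runs.filter (fun r => 2 ≤ r.length)).flatten,
   (runs.filter (fun r => r.length = 1)).flatMap (fun r => [(r.headD (0, 0)).1, (r.headD (0, 0)).2]))

-- ===== PRECONDITION & SPEC =====
def Spec_StemmedIsolated (sorted_pairs : List (Int × Int)) (out : (List (Int × Int)) × List Int) : Prop := out = StemmedIsolated_alt sorted_pairs
instance (sorted_pairs : List (Int × Int)) (out : (List (Int × Int)) × List Int) : Decidable (Spec_StemmedIsolated sorted_pairs out) := by unfold Spec_StemmedIsolated; infer_instance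

-- ===== CLAIM (what is proved, stated in full; the proofs are below) =====
def Claim_equal_StemmedIsolated : Prop := ∀ (sorted_pairs : List (Int × Int)), Dom_StemmedIsolated sorted_pairs → Spec_StemmedIsolated sorted_pairs (StemmedIsolated sorted_pairs)

-- ===== LEMMAS AND PROOFS =====

-- the stem-link relation on two pairs
def pvLinkP (p q : Int × Int) : Bool := (p.1 + 1 == q.1) && (p.2 == q.2 + 1)

-- link to the next element, false at the end of the list
def pvNext (p : Int × Int) : List (Int × Int) → Bool
  | [] => false
  | q :: _ => pvLinkP p q

-- pointwise classification: element stemmed iff linked to previous (flag) or next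
def pvU : Bool → List (Int × Int) → (List (Int × Int)) × List Int
  | _, [] => ([], [])
  | pl, p :: rest =>
    let r := pvU (pvNext p rest) rest
    if pl || pvNext p rest then (p :: r.1, r.2) else (r.1, p.1 :: p.2 :: r.2)

-- maximal chain continuation after prev, and the remainder
def pvTake (prev : Int × Int) : List (Int × Int) → List (Int × Int)
  | [] => []
  | q :: t => if pvLinkP prev q then q :: pvTake q t else []

def pvDrop (prev : Int × Int) : List (Int × Int) → List (Int × Int)
  | [] => []
  | q :: t => if pvLinkP prev q then pvDrop q t else q :: t

-- recursive specification of Source B's segmentation loop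
def pvCollect : List (Int × Int) → List (Int × Int) → List (List (Int × Int))
  | cur, [] => [cur]
  | cur, p :: t =>
    if pvLinkP (cur.getLastD (0, 0)) p then pvCollect (cur ++ [p]) t else cur :: pvCollect [p] t

def pvRuns : List (Int × Int) → List (List (Int × Int))
  | [] => []
  | p :: t => pvCollect [p] t

-- Source B's stage-2 classification of a run list
def pvOut (rs : List (List (Int × Int))) : (List (Int × Int)) × List Int :=
  ((rs.filter (fun r => 2 ≤ r.length)).flatten,
   (rs.filter (fun r => r.length = 1)).flatMap (fun r => [(r.headD (0, 0)).1, (r.headD (0, 0)).2]))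

-- index-based link relation (as A reads it through pyGetD)
def pvLink (sp : List (Int × Int)) (i : Int) : Bool :=
  (PySem.List.pyGetD sp i (0, 0)).1 + 1 == (PySem.List.pyGetD sp (i + 1) (0, 0)).1 &&
  (PySem.List.pyGetD sp i (0, 0)).2 == (PySem.List.pyGetD sp (i + 1) (0, 0)).2 + 1

-- A's uniform per-index condition
def pvCondA (sp : List (Int × Int)) (i : Int) : Bool :=
  (decide (0 < i) && pvLink sp (i - 1)) || (decide (i < (sp.length : Int) - 1) && pvLink sp i)

def pvBodyU (sp : List (Int × Int)) (st : (List (Int × Int)) × List Int) (i : Int) :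
    (List (Int × Int)) × List Int :=
  if pvCondA sp i then (st.1 ++ [PySem.List.pyGetD sp i (0, 0)], st.2)
  else (st.1, st.2 ++ [(PySem.List.pyGetD sp i (0, 0)).1, (PySem.List.pyGetD sp i (0, 0)).2])

theorem pvU_nil_flag (pl pl' : Bool) (l : List (Int × Int)) (h : l = []) :
    pvU pl l = pvU pl' l := by subst h; rfl

theorem pvU_cons (pl : Bool) (p : Int × Int) (rest : List (Int × Int)) :
    pvU pl (p :: rest) =
      if pl || pvNext p rest then
        (p :: (pvU (pvNext p rest) rest).1, (pvU (pvNext p rest) rest).2)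
      else ((pvU (pvNext p rest) rest).1, p.1 :: p.2 :: (pvU (pvNext p rest) rest).2) := rfl

theorem pvDrop_length (prev : Int × Int) (l : List (Int × Int)) :
    (pvDrop prev l).length ≤ l.length := by
  induction l generalizing prev with
  | nil => simp [pvDrop]
  | cons q t ih =>
    simp only [pvDrop]
    split
    · exact le_trans (ih q) (Nat.le_succ _)
    · exact le_refl _

theorem pvDrop_of_take_nil (prev : Int × Int) (l : List (Int × Int))
    (h : pvTake prev l = []) : pvDrop prev l = l := by
  cases l with
  | nil => rfl
  | cons q t =>
    simp only [pvTake] at h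
    simp only [pvDrop]
    split
    · simp_all
    · rfl

theorem pvCollect_eq_take (sp : List (Int × Int)) : ∀ cur : List (Int × Int), cur ≠ [] →
    pvCollect cur sp =
      (cur ++ pvTake (cur.getLastD (0, 0)) sp) :: pvRuns (pvDrop (cur.getLastD (0, 0)) sp) := by
  induction sp with
  | nil => intro cur h; simp [pvCollect, pvTake, pvDrop, pvRuns]
  | cons p t ih =>
    intro cur h
    simp only [pvCollect, pvTake, pvDrop]
    by_cases hl : pvLinkP (cur.getLastD (0, 0)) p = true
    · rw [if_pos hl, if_pos hl, if_pos hl]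
      rw [ih (cur ++ [p]) (by simp)]
      simp [List.append_assoc]
    · rw [if_neg hl, if_neg hl, if_neg hl]
      simp [pvRuns]

theorem pvU_stem : ∀ (sp : List (Int × Int)) (p : Int × Int) (pl : Bool),
    (pl = true ∨ pvTake p sp ≠ []) →
    pvU pl (p :: sp) =
      ((p :: pvTake p sp) ++ (pvU false (pvDrop p sp)).1, (pvU false (pvDrop p sp)).2) := by
  intro sp
  induction sp with
  | nil =>
    intro p pl h
    rcases h with h | h
    · subst h
      rw [pvU_cons]
      simp [pvNext, pvU, pvTake, pvDrop]
    · simp [pvTake] at h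
  | cons q t ih =>
    intro p pl h
    cases hl : pvLinkP p q with
    | true =>
      have hnext : pvNext p (q :: t) = true := by simp [pvNext, hl]
      rw [pvU_cons, hnext]
      simp only [Bool.or_true, if_true]
      rw [ih q true (Or.inl rfl)]
      simp [pvTake, pvDrop, hl]
    | false =>
      have hpl : pl = true := by
        rcases h with h | h
        · exact h
        · simp [pvTake, hl] at h
      subst hpl
      have hnext : pvNext p (q :: t) = false := by simp [pvNext, hl]
      rw [pvU_cons, hnext]
      simp [pvTake, pvDrop, hl]

theorem pvU_iso (sp : List (Int × Int)) (p : Int × Int) (h : pvTake p sp = []) :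
    pvU false (p :: sp) = ((pvU false sp).1, p.1 :: p.2 :: (pvU false sp).2) := by
  cases sp with
  | nil =>
    rw [pvU_cons]
    simp [pvNext]
  | cons q t =>
    simp only [pvTake] at h
    have hl : pvLinkP p q = false := by
      cases hc : pvLinkP p q
      · rfl
      · simp [hc] at h
    have hnext : pvNext p (q :: t) = false := by simp [pvNext, hl]
    rw [pvU_cons, hnext]
    simp

theorem pvOut_runs_eq_U : ∀ (n : Nat) (sp : List (Int × Int)), sp.length ≤ n →
    pvOut (pvRuns sp) = pvU false sp := by
  intro n
  induction n with
  | zero =>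
    intro sp h
    have : sp = [] := List.length_eq_zero_iff.mp (Nat.le_zero.mp h)
    subst this; rfl
  | succ n ih =>
    intro sp h
    cases sp with
    | nil => rfl
    | cons p t =>
      have hruns : pvRuns (p :: t) =
          (([p] ++ pvTake p t) :: pvRuns (pvDrop p t)) := by
        simp only [pvRuns]
        rw [pvCollect_eq_take t [p] (by simp)]
        rfl
      rw [hruns]
      by_cases hemp : pvTake p t = []
      · rw [hemp, pvDrop_of_take_nil p t hemp]
        have ht : t.length ≤ n := by simpa using h
        rw [pvU_iso t p hemp, ← ih t ht]
        simp [pvOut]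
      · have hd : (pvDrop p t).length ≤ n := by
          have := pvDrop_length p t
          simp at h; omega
        rw [pvU_stem t p false (Or.inr hemp), ← ih _ hd]
        have h1 : 1 ≤ (pvTake p t).length := by
          cases hx : pvTake p t with
          | nil => exact absurd hx hemp
          | cons a b => simp
        simp [pvOut, List.flatten_cons, h1, hemp]
      
theorem pvFoldB (sp : List (Int × Int)) :
    ∀ (runs : List (List (Int × Int))) (cur : List (Int × Int)), cur ≠ [] →
    (let st := sp.foldl pvStepB (runs, cur);
     if st.2 = [] then st.1 else st.1 ++ [st.2]) = runs ++ pvCollect cur sp := by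
  induction sp with
  | nil => intro runs cur h; simp [pvCollect, h]
  | cons p t ih =>
    intro runs cur h
    simp only [List.foldl_cons]
    have hstep : pvStepB (runs, cur) p =
        if pvLinkP (cur.getLastD (0, 0)) p then (runs, cur ++ [p])
        else (runs ++ [cur], [p]) := by
      simp [pvStepB, pvLinkP, h]
    rw [hstep]
    by_cases hl : pvLinkP (cur.getLastD (0, 0)) p = true
    · rw [if_pos hl]
      rw [ih runs (cur ++ [p]) (by simp)]
      simp only [pvCollect]
      rw [if_pos hl]
    · rw [if_neg hl]
      rw [ih (runs ++ [cur]) [p] (by simp)]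
      simp only [pvCollect]
      rw [if_neg hl]
      simp

theorem pvAlt_eq_out (sp : List (Int × Int)) :
    StemmedIsolated_alt sp = pvOut (pvRuns sp) := by
  cases sp with
  | nil => rfl
  | cons p t =>
    show pvOut (let st := (p :: t).foldl pvStepB ([], []);
                if st.2 = [] then st.1 else st.1 ++ [st.2]) = _
    simp only [List.foldl_cons]
    have h0 : pvStepB ([], []) p = ([], [p]) := by simp [pvStepB]
    rw [h0, pvFoldB t [] [p] (by simp)]
    simp [pvRuns]

-- ==== A side ====

theorem pvA_uniform (sp : List (Int × Int)) (h : 2 ≤ sp.length) :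
    StemmedIsolated sp = (PySem.List.pyRange 0 sp.length 1).foldl (pvBodyU sp) ([], []) := by
  unfold StemmedIsolated
  rw [if_neg (by omega)]
  apply PySem.List.foldl_congr_mem
  intro acc i hi
  rw [PySem.List.mem_pyRange_one] at hi
  obtain ⟨hi0, hin⟩ := hi
  by_cases hz : i = 0
  · subst hz
    have : pvCondA sp 0 = pvLink sp 0 := by
      simp [pvCondA]
      omega
    simp [pvBodyU, this, pvLink]
  · by_cases hlast : i = (sp.length : Int) - 1
    · have hpos : 0 < i := by omega
      rw [if_neg (by simp [hz]), if_pos (by simp [hlast])]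
      have d1 : decide ((0:Int) < i) = true := by simp [hpos]
      have d2 : decide (i < (sp.length : Int) - 1) = false := by simp; omega
      have : pvCondA sp i = pvLink sp (i - 1) := by simp [pvCondA, d1, d2]
      simp [pvBodyU, this, pvLink]
    · have hpos : 0 < i := by omega
      have hmid : i < (sp.length : Int) - 1 := by omega
      rw [if_neg (by simp [hz]), if_neg (by simp [hlast])]
      have : pvCondA sp i = (pvLink sp i || pvLink sp (i - 1)) := by
        simp [pvCondA, hpos, hmid, Bool.or_comm]
      simp [pvBodyU, this, pvLink]

theorem pvLink_elem (sp : List (Int × Int)) (i : Int) (h0 : 0 ≤ i)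
    (h1 : i + 1 < (sp.length : Int)) :
    pvLink sp i = pvLinkP (sp[i.toNat]'(by omega)) (sp[i.toNat + 1]'(by omega)) := by
  rw [pvLink, pvLinkP,
      @PySem.List.pyGetD_eq_getElem (Int × Int) sp i (0,0) h0 (by omega),
      @PySem.List.pyGetD_eq_getElem (Int × Int) sp (i+1) (0,0) (by omega) h1]
  have hidx : (i + 1).toNat = i.toNat + 1 := by omega
  simp [hidx]

theorem pvG (sp : List (Int × Int)) : ∀ (k : Nat) (i : Int) (acc : (List (Int × Int)) × List Int),
    0 ≤ i → i + k = (sp.length : Int) →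
    (PySem.List.pyRange i sp.length 1).foldl (pvBodyU sp) acc =
      (acc.1 ++ (pvU (decide (0 < i) && pvLink sp (i - 1)) (sp.drop i.toNat)).1,
       acc.2 ++ (pvU (decide (0 < i) && pvLink sp (i - 1)) (sp.drop i.toNat)).2) := by
  intro k
  induction k with
  | zero =>
    intro i acc h0 hk
    have hi : i = (sp.length : Int) := by omega
    rw [PySem.List.pyRange_one_eq_nil (by omega)]
    have hdrop : sp.drop i.toNat = [] := by
      apply List.drop_eq_nil_of_le; omega
    simp [hdrop, pvU]
  | succ k ih =>
    intro i acc h0 hk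
    have hin : i < (sp.length : Int) := by omega
    have hitn : i.toNat < sp.length := by omega
    rw [PySem.List.pyRange_one_cons hin, List.foldl_cons]
    have hdrop : sp.drop i.toNat = sp[i.toNat] :: sp.drop (i.toNat + 1) :=
      List.drop_eq_getElem_cons hitn
    -- the next-link flag of pvU at position i
    have hnext : pvNext (sp[i.toNat]) (sp.drop (i.toNat + 1)) =
        (decide (i < (sp.length : Int) - 1) && pvLink sp i) := by
      by_cases hm : i + 1 < (sp.length : Int)
      · have hd2 : sp.drop (i.toNat + 1) = sp[i.toNat + 1] :: sp.drop (i.toNat + 2) :=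
          List.drop_eq_getElem_cons (by omega)
        rw [hd2]
        simp only [pvNext]
        rw [pvLink_elem sp i h0 hm]
        simp; omega
      · have hd2 : sp.drop (i.toNat + 1) = [] := by
          apply List.drop_eq_nil_of_le; omega
        rw [hd2]
        simp only [pvNext]
        have : ¬ (i < (sp.length : Int) - 1) := by omega
        simp [this]
    have hcond : pvCondA sp i =
        ((decide (0 < i) && pvLink sp (i - 1)) || pvNext (sp[i.toNat]) (sp.drop (i.toNat + 1))) := by
      rw [hnext]; rfl
    have hget : PySem.List.pyGetD sp i (0, 0) = sp[i.toNat] :=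
      @PySem.List.pyGetD_eq_getElem (Int × Int) sp i (0,0) h0 (by exact_mod_cast hin)
    have hflag1 : (decide (0 < i + 1) && pvLink sp (i + 1 - 1)) = pvLink sp i := by
      simp; omega
    have ihr := ih (i + 1) (pvBodyU sp acc i) (by omega) (by omega)
    rw [ihr]
    have htn : (i + 1).toNat = i.toNat + 1 := by omega
    rw [htn, hflag1]
    -- U on drop i with the matching flags
    have hU : pvU (decide (0 < i) && pvLink sp (i - 1)) (sp.drop i.toNat) =
        (let r := pvU (pvLink sp i) (sp.drop (i.toNat + 1));
         if (decide (0 < i) && pvLink sp (i - 1)) || pvNext (sp[i.toNat]) (sp.drop (i.toNat + 1)) then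
           (sp[i.toNat] :: r.1, r.2)
         else (r.1, (sp[i.toNat]).1 :: (sp[i.toNat]).2 :: r.2)) := by
      rw [hdrop]
      simp only [pvU]
      by_cases hm : i + 1 < (sp.length : Int)
      · rw [hnext]
        have : (decide (i < (sp.length : Int) - 1) && pvLink sp i) = pvLink sp i := by
          simp; omega
        rw [this]
      · have hd2 : sp.drop (i.toNat + 1) = [] := by apply List.drop_eq_nil_of_le; omega
        rw [hnext, pvU_nil_flag (decide (i < (sp.length : Int) - 1) && pvLink sp i) (pvLink sp i) _ hd2]
    rw [hU]
    simp only []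
    unfold pvBodyU
    rw [hcond, hget]
    by_cases hc : ((decide (0 < i) && pvLink sp (i - 1)) || pvNext (sp[i.toNat]) (sp.drop (i.toNat + 1))) = true
    · simp [hc]
    · simp only [Bool.not_eq_true] at hc
      simp [hc]

theorem pvA_eq_U (sp : List (Int × Int)) (h : 2 ≤ sp.length) :
    StemmedIsolated sp = pvU false sp := by
  rw [pvA_uniform sp h]
  have := pvG sp sp.length 0 ([], []) (by omega) (by omega)
  rw [this]
  simp

theorem StemmedIsolated_eq (sp : List (Int × Int)) :
    StemmedIsolated sp = StemmedIsolated_alt sp := by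
  by_cases h2 : 2 ≤ sp.length
  · rw [pvA_eq_U sp h2, pvAlt_eq_out sp,
        pvOut_runs_eq_U sp.length sp (le_refl _)]
  · cases sp with
    | nil => rfl
    | cons p t =>
      cases t with
      | nil =>
        unfold StemmedIsolated StemmedIsolated_alt
        simp [pvStepB, PySem.List.pyGetD_zero_cons]
      | cons q u =>
        exact absurd (by simp : 2 ≤ (p :: q :: u).length) h2

-- ===== VERDICT (by name: the statement is the Claim_ definition above) =====
theorem StemmedIsolated_spec : Claim_equal_StemmedIsolated := by
  intro sp _
  exact StemmedIsolated_eq sp
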